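-- pv_equiv track=rewrite | github.com/omgimanerd/ritcs | cs264/src/hw3/problem3/pt2.py | try2
-- ===== SOURCE A (Python) =====
-- def try2(sequence):
--   num_loops = 0
--   # Create a list to hold all of the valid subsequences
--   subsequences = []
--   # Try the following with all l = 1, 2, ..., n
--   for l in range(0, len(sequence)):
--     num_loops += 1
--     # Let i = l
--     i = l
--     subsequence = []
--     # Include a_i in the subsequence
--     subsequence.append(sequence[l])
--     # for every remaining element of the sequence,
--     while i < len(sequence):
--       num_loops += 1
--       # Attempt to find a number after it in the sequence with a larger value
--       for j in range(i, len(sequence)):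
--         num_loops += 1
--         if sequence[i] < sequence[j]:
--           # Should that number exist, add it to the sequence and repeat
--           subsequence.append(sequence[j])
--           i = j
--           break
--         if j == (len(sequence) - 1):
--           i = len(sequence)
--           break
--     subsequences.append(subsequence)
--   # Out of the n obtained sequences, output one with the longest length
--   sort = sorted(subsequences, key=lambda x: len(x), reverse=True)
--   return sort[0] if len(sort) > 0 else None
-- ===== SOURCE B (Python) =====
-- def try2(sequence):
--   # One right-to-left pass: monotonic stack yields each element's nearest
--   # strictly-greater successor and (memoized) greedy-chain length; then the
--   # earliest start of maximal chain length is reconstructed by pointer chasing.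
--   n = len(sequence)
--   if n == 0:
--     return None
--   nxt = [None] * n          # index of first strictly greater element to the right
--   stack = []                # (index, chain length), values increasing toward the bottom
--   best_i, best_len = 0, 0
--   for i in range(n - 1, -1, -1):
--     while stack and sequence[stack[-1][0]] <= sequence[i]:
--       stack.pop()
--     if stack:
--       nxt[i] = stack[-1][0]
--       li = stack[-1][1] + 1
--     else:
--       li = 1
--     stack.append((i, li))
--     if best_len <= li:
--       best_i, best_len = i, li
--   chain = []
--   j = best_i
--   while j is not None:
--     chain.append(sequence[j])
--     j = nxt[j]
--   return chain
-- ===== Notes on version B (the rewrite author's own statement) =====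
-- stated objective: faster
-- what changed: A rebuilds each greedy next-greater chain from every start with nested scans and sorts all n chains to pick the longest; B makes one right-to-left monotonic-stack pass that memoizes each index's next-greater successor and chain length, tracks the earliest maximal start with a running argmax, and reconstructs only the winning chain.
import Mathlib
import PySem

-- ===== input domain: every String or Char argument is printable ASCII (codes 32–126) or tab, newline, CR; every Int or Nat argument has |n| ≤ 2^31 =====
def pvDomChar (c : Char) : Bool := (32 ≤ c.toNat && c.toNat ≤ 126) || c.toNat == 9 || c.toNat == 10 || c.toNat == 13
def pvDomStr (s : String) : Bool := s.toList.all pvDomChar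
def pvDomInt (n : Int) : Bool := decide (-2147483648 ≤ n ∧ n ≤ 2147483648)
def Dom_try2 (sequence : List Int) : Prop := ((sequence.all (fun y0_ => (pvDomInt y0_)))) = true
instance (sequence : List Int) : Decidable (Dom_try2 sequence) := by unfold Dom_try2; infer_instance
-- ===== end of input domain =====

-- B replaces A's per-start greedy re-walk + sort by one right-to-left monotonic-stack pass with
-- memoized chain lengths and an argmax, then reconstructs the best chain (asymptotically faster).

-- ===== PORT A =====
-- A's inner 'for j in range(i, len(sequence))' loop; returns the updated i.
-- All index accesses are in range whenever A runs, so sequence[i] is ported as getD.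
def try2InnerA (s : List Int) (i j : Nat) : Nat :=
  if _h : j < s.length then
    if s.getD i 0 < s.getD j 0 then j
    else if j = s.length - 1 then s.length
    else try2InnerA s i (j + 1)
  else i
  termination_by s.length - j

-- termination fact for the while-loop port: the updated i strictly grows
theorem try2InnerA_gt (s : List Int) (i : Nat) :
    ∀ j, i < j → j < s.length → i < try2InnerA s i j := by
  intro j
  induction hfu : s.length - j using Nat.strong_induction_on generalizing j with
  | _ f ih =>
    intro hij hj
    unfold try2InnerA
    simp only [hj, dif_pos]
    split
    · exact hij
    · split
      · omega
      · exact ih (s.length - (j + 1)) (by omega) (j + 1) rfl (by omega) (by omega)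

theorem try2InnerA_gt_start (s : List Int) (i : Nat) (h : i < s.length) :
    i < try2InnerA s i i := by
  unfold try2InnerA
  simp only [h, dif_pos, lt_self_iff_false, if_false]
  split
  · omega
  · exact try2InnerA_gt s i (i + 1) (by omega) (by omega)

-- A's 'while i < len(sequence)' loop, carrying the subsequence being built
def try2WhileA (s : List Int) (i : Nat) (sub : List Int) : List Int :=
  if h : i < s.length then
    let i' := try2InnerA s i i
    try2WhileA s i' (if i' < s.length then sub ++ [s.getD i' 0] else sub)
  else sub
  termination_by s.length - i
  decreasing_by have := try2InnerA_gt_start s i h; omega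

def try2 (sequence : List Int) : Option (List Int) :=
  let subsequences := (List.range sequence.length).foldl
    (fun subs l => subs ++ [try2WhileA sequence l [sequence.getD l 0]]) []
  let sort := PySem.List.sorted subsequences (fun x => (x.length : Int)) true
  if 0 < sort.length then PySem.List.pyGet? sort 0 else none

-- ===== PORT B =====
-- 'while stack and sequence[stack[-1][0]] <= sequence[i]: stack.pop()'
def try2PopW (s : List Int) (x : Int) : List (Nat × Nat) → List (Nat × Nat)
  | [] => []
  | t :: rest => if s.getD t.1 0 ≤ x then try2PopW s x rest else t :: rest

-- the 'for i in range(n - 1, -1, -1)' pass: k is the number of indices still to process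
-- (i = k - 1); state = (stack of (index, chain length), nxt entries for i..n-1, (best_i, best_len))
def try2Pass (s : List Int) :
    Nat → List (Nat × Nat) → List (Option Nat) → Nat × Nat → List (Option Nat) × (Nat × Nat)
  | 0, _, nxt, best => (nxt, best)
  | k + 1, st, nxt, best =>
    let st' := try2PopW s (s.getD k 0) st
    let p : Option Nat × Nat := match st' with
      | [] => (none, 1)
      | t :: _ => (some t.1, t.2 + 1)
    try2Pass s k ((k, p.2) :: st') (p.1 :: nxt) (if best.2 ≤ p.2 then (k, p.2) else best)

-- 'while j is not None' reconstruction; fuel n is never exhausted (chain indices strictly increase)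
def try2Walk (s : List Int) (nxt : List (Option Nat)) : Nat → Option Nat → List Int → List Int
  | _, none, acc => acc
  | 0, some _, acc => acc
  | f + 1, some j, acc => try2Walk s nxt f (nxt.getD j none) (acc ++ [s.getD j 0])

def try2_alt (sequence : List Int) : Option (List Int) :=
  if sequence.length = 0 then none
  else
    let r := try2Pass sequence sequence.length [] [] (0, 0)
    some (try2Walk sequence r.1 sequence.length (some r.2.1) [])

-- ===== PRECONDITION & SPEC =====
def Spec_try2 (sequence : List Int) (out : Option (List Int)) : Prop := out = try2_alt sequence
instance (sequence : List Int) (out : Option (List Int)) : Decidable (Spec_try2 sequence out) := by unfold Spec_try2; infer_instance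

-- ===== CLAIM (what is proved, stated in full; the proofs are below) =====
def Claim_equal_try2 : Prop := ∀ (sequence : List Int), Dom_try2 sequence → Spec_try2 sequence (try2 sequence)

-- ===== LEMMAS AND PROOFS =====

-- first index j' ≥ j with x < s[j'] (the "next strictly greater" search both programs perform)
def fg (s : List Int) (x : Int) (j : Nat) : Option Nat :=
  if _h : j < s.length then (if x < s.getD j 0 then some j else fg s x (j + 1)) else none
  termination_by s.length - j

theorem fg_some (s : List Int) (x : Int) :
    ∀ j m, fg s x j = some m →
      j ≤ m ∧ m < s.length ∧ x < s.getD m 0 ∧ ∀ t, j ≤ t → t < m → s.getD t 0 ≤ x := by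
  intro j
  induction hfu : s.length - j using Nat.strong_induction_on generalizing j with
  | _ f ih =>
    intro m hm
    unfold fg at hm
    by_cases hj : j < s.length
    · simp only [hj, dif_pos] at hm
      by_cases hx : x < s.getD j 0
      · simp only [hx, if_pos] at hm
        obtain rfl : j = m := by simpa using hm
        exact ⟨le_refl _, hj, hx, fun t ht1 ht2 => absurd (lt_of_le_of_lt ht1 ht2) (lt_irrefl _)⟩
      · simp only [hx, if_neg, if_false] at hm
        obtain ⟨h1, h2, h3, h4⟩ := ih (s.length - (j+1)) (by omega) (j+1) rfl m hm
        refine ⟨by omega, h2, h3, fun t ht1 ht2 => ?_⟩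
        rcases Nat.eq_or_lt_of_le ht1 with rfl | hlt
        · exact not_lt.mp hx
        · exact h4 t hlt ht2
    · simp [hj] at hm

theorem fg_none_iff (s : List Int) (x : Int) :
    ∀ j, (fg s x j = none ↔ ∀ t, j ≤ t → t < s.length → s.getD t 0 ≤ x) := by
  intro j
  induction hfu : s.length - j using Nat.strong_induction_on generalizing j with
  | _ f ih =>
    unfold fg
    by_cases hj : j < s.length
    · simp only [hj, dif_pos]
      by_cases hx : x < s.getD j 0
      · simp only [hx, if_pos]
        constructor
        · intro h; exact absurd h (by simp)
        · intro h; exact absurd (h j (le_refl _) hj) (by omega)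
      · simp only [hx, if_neg, if_false]
        rw [ih (s.length - (j+1)) (by omega) (j+1) rfl]
        constructor
        · intro h t ht1 ht2
          rcases Nat.eq_or_lt_of_le ht1 with rfl | hlt
          · omega
          · exact h t hlt ht2
        · intro h t ht1 ht2; exact h t (by omega) ht2
    · simp only [hj, dif_neg]
      constructor
      · intro _ t ht1 ht2; omega
      · intro _; rfl

theorem fg_skip (s : List Int) (x : Int) :
    ∀ a b, a ≤ b → (∀ t, a ≤ t → t < b → s.getD t 0 ≤ x) → fg s x a = fg s x b := by
  intro a b
  induction hd : b - a using Nat.strong_induction_on generalizing a with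
  | _ d ih =>
    intro hab h
    by_cases hb : a = b
    · subst hb; rfl
    · have ha : a < b := by omega
      conv_lhs => unfold fg
      by_cases hj : a < s.length
      · simp only [hj, dif_pos]
        have hx : ¬ x < s.getD a 0 := by have := h a (le_refl _) ha; omega
        simp only [hx, if_false]
        exact ih (b - (a + 1)) (by omega) (a + 1) rfl (by omega)
          (fun t ht1 ht2 => h t (by omega) ht2)
      · have h2 : fg s x b = none := by
          unfold fg
          have : ¬ b < s.length := by omega
          simp [this]
        rw [h2]
        simp [hj]

-- index of the first strictly greater element after i
def ng (s : List Int) (i : Nat) : Option Nat := fg s (s.getD i 0) (i + 1)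

theorem ng_gt (s : List Int) (i m : Nat) (h : ng s i = some m) : i < m ∧ m < s.length := by
  have := fg_some s (s.getD i 0) (i + 1) m h
  omega

-- the greedy chain of values starting at index i, and its index chain
def chain (s : List Int) (i : Nat) : List Int :=
  s.getD i 0 ::
    (match hn : ng s i with
     | none => []
     | some j => chain s j)
  termination_by s.length - i
  decreasing_by have := ng_gt s i j hn; omega

def chainIdx (s : List Int) (i : Nat) : List Nat :=
  i ::
    (match hn : ng s i with
     | none => []
     | some j => chainIdx s j)
  termination_by s.length - i
  decreasing_by have := ng_gt s i j hn; omega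

def clen (s : List Int) (i : Nat) : Nat := (chain s i).length

theorem chain_none (s : List Int) (i : Nat) (h : ng s i = none) :
    chain s i = [s.getD i 0] := by
  rw [chain]
  congr 1
  split
  · rfl
  · simp_all

theorem chain_some (s : List Int) (i m : Nat) (h : ng s i = some m) :
    chain s i = s.getD i 0 :: chain s m := by
  rw [chain]
  congr 1
  split
  · simp_all
  · simp_all

theorem chainIdx_none (s : List Int) (i : Nat) (h : ng s i = none) : chainIdx s i = [i] := by
  rw [chainIdx]
  congr 1
  split
  · rfl
  · simp_all

theorem chainIdx_some (s : List Int) (i m : Nat) (h : ng s i = some m) :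
    chainIdx s i = i :: chainIdx s m := by
  rw [chainIdx]
  congr 1
  split
  · simp_all
  · simp_all

theorem clen_eq (s : List Int) (i : Nat) :
    clen s i = match ng s i with | none => 1 | some m => clen s m + 1 := by
  unfold clen
  cases h : ng s i
  · rw [chain_none s i h]; rfl
  · rw [chain_some s i _ h]; rfl

-- reference for B's running best: state on entry of try2Pass with counter k
def bestSpec (s : List Int) (k : Nat) : Nat × Nat :=
  if _h : k < s.length then
    let b := bestSpec s (k + 1)
    if b.2 ≤ clen s k then (k, clen s k) else b
  else (0, 0)
  termination_by s.length - k

def stState (s : List Int) (k : Nat) : List (Nat × Nat) :=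
  if k < s.length then (chainIdx s k).map (fun j => (j, clen s j)) else []

-- ---- A-side characterization ----

theorem innerA_eq_fg (s : List Int) (i : Nat) :
    ∀ j, j < s.length → try2InnerA s i j = (fg s (s.getD i 0) j).getD s.length := by
  intro j
  induction hfu : s.length - j using Nat.strong_induction_on generalizing j with
  | _ f ih =>
    intro hj
    unfold try2InnerA fg
    simp only [hj, dif_pos]
    by_cases hx : s.getD i 0 < s.getD j 0
    · simp only [if_pos hx]
      rfl
    · simp only [if_neg hx]
      by_cases hlast : j = s.length - 1
      · have hstop : fg s (s.getD i 0) (j + 1) = none := by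
          unfold fg
          have : ¬ j + 1 < s.length := by omega
          simp [this]
        simp only [if_pos hlast, hstop, Option.getD_none]
      · simp only [if_neg hlast]
        exact ih (s.length - (j + 1)) (by omega) (j + 1) rfl (by omega)

theorem innerA_start_eq_ng (s : List Int) (i : Nat) (h : i < s.length) :
    try2InnerA s i i = (ng s i).getD s.length := by
  rw [innerA_eq_fg s i i h]
  unfold ng
  congr 1
  conv_lhs => unfold fg
  simp [h]

theorem whileA_eq_chain_tail (s : List Int) :
    ∀ i, i < s.length → ∀ acc, try2WhileA s i acc = acc ++ (chain s i).tail := by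
  intro i
  induction hfu : s.length - i using Nat.strong_induction_on generalizing i with
  | _ f ih =>
    intro hi acc
    rw [try2WhileA]
    simp only [hi, dif_pos]
    rw [innerA_start_eq_ng s i hi]
    cases h : ng s i
    · rw [chain_none s i h]
      have hn : ¬ s.length < s.length := by omega
      simp only [Option.getD_none, hn, if_false]
      rw [try2WhileA]
      simp [hn]
    · rename_i m
      obtain ⟨him, hm⟩ := ng_gt s i m h
      rw [chain_some s i m h]
      simp only [Option.getD_some, hm, if_true]
      rw [ih (s.length - m) (by omega) m rfl hm]
      rw [chain]
      simp

theorem subsequences_eq_map (s : List Int) :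
    (List.range s.length).foldl
      (fun subs l => subs ++ [try2WhileA s l [s.getD l 0]]) [] =
    (List.range s.length).map (fun l => chain s l) := by
  rw [PySem.List.foldl_append_singleton_eq_map]
  apply List.map_congr_left
  intro l hl
  have hln : l < s.length := List.mem_range.mp hl
  rw [whileA_eq_chain_tail s l hln, chain]
  simp

-- head of a stable reverse sort = Python's max (first extremal element)
theorem head_ins_fold {α : Type} (key : α → Int) :
    ∀ (xs : List α) (acc : List α),
      (List.foldl (fun acc x => PySem.List.insertBy (fun a b => decide (key b < key a)) x acc) acc xs).head? =
      List.foldl (fun a x => match a with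
        | none => some x
        | some m => if key m < key x then some x else some m) acc.head? xs := by
  intro xs
  induction xs with
  | nil => intro acc; rfl
  | cons x xs ih =>
    intro acc
    rw [List.foldl_cons, List.foldl_cons, ih]
    congr 1
    cases acc with
    | nil => rfl
    | cons y ys =>
      simp only [PySem.List.insertBy, List.head?_cons]
      by_cases h : key y < key x
      · simp [h]
      · simp [h]

theorem head_sorted_rev_eq_max? {α : Type} (xs : List α) (key : α → Int) :
    (PySem.List.sorted xs key true).head? = PySem.List.max? xs key := by
  rw [PySem.List.sorted_rev_eq_foldl_insertBy, head_ins_fold]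
  rfl

theorem max?_map {α β : Type} (f : α → β) (key : β → Int) (xs : List α) :
    PySem.List.max? (xs.map f) key = (PySem.List.max? xs (fun x => key (f x))).map f := by
  unfold PySem.List.max?
  rw [List.foldl_map]
  have : ∀ (l : List α) (a : Option α),
      List.foldl (fun acc x => match acc with
        | none => some (f x)
        | some m => if key m < key (f x) then some (f x) else some m) (a.map f) l =
      (List.foldl (fun acc x => match acc with
        | none => some x
        | some m => if key (f m) < key (f x) then some x else some m) a l).map f := by
    intro l
    induction l with
    | nil => intro a; rfl
    | cons x l ih =>
      intro a
      rw [List.foldl_cons, List.foldl_cons, ← ih]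
      congr 1
      cases a with
      | none => rfl
      | some m =>
        simp only [Option.map_some]
        by_cases h : key (f m) < key (f x) <;> simp [h]
  exact this xs none

theorem max?_cons {α : Type} (key : α → Int) (x : α) (l : List α) :
    PySem.List.max? (x :: l) key =
      match PySem.List.max? l key with
      | none => some x
      | some m => if key x < key m then some m else some x := by
  have G : ∀ (l : List α) (x : α),
      List.foldl (fun acc y => match acc with
        | none => some y
        | some m => if key m < key y then some y else some m) (some x) l =
      match List.foldl (fun acc y => match acc with
        | none => some y
        | some m => if key m < key y then some y else some m) none l with
      | none => some x
      | some m => if key x < key m then some m else some x := by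
    intro l
    induction l with
    | nil => intro x; rfl
    | cons y l ih =>
      intro x
      rw [List.foldl_cons, List.foldl_cons]
      show List.foldl _ (if key x < key y then some y else some x) l =
        match List.foldl _ (some y) l with
        | none => some x
        | some m => if key x < key m then some m else some x
      rw [ih y]
      by_cases h : key x < key y
      · rw [if_pos h, ih y]
        cases hF : List.foldl (fun acc y => match acc with
          | none => some y
          | some m => if key m < key y then some y else some m) none l with
        | none => dsimp only; rw [if_pos h]
        | some m => dsimp only; split_ifs <;> dsimp only <;> (try split_ifs) <;> first | rfl | omega
      · rw [if_neg h, ih x]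
        cases hF : List.foldl (fun acc y => match acc with
          | none => some y
          | some m => if key m < key y then some y else some m) none l with
        | none => dsimp only; rw [if_neg h]
        | some m => dsimp only; split_ifs <;> dsimp only <;> (try split_ifs) <;> first | rfl | omega
  unfold PySem.List.max?
  rw [List.foldl_cons]
  exact G l x

theorem try2_eq_max? (s : List Int) :
    try2 s = PySem.List.max? ((List.range s.length).map (fun l => chain s l))
      (fun x => (x.length : Int)) := by
  unfold try2
  dsimp only
  rw [subsequences_eq_map]
  rw [← head_sorted_rev_eq_max?]
  cases hs : PySem.List.sorted ((List.range s.length).map fun l => chain s l)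
      (fun x => (x.length : Int)) true with
  | nil => simp
  | cons m t =>
    simp only [List.length_cons, List.head?_cons]
    have hpos : 0 < t.length + 1 := by omega
    rw [if_pos hpos]
    simp [PySem.List.pyGet?, PySem.List.pyIdx?]

-- ---- max? bookkeeping ----

-- ---- B-side: stack invariant ----

theorem popW_chain (s : List Int) :
    ∀ j, j < s.length → ∀ x,
      try2PopW s x ((chainIdx s j).map (fun t => (t, clen s t))) =
        match fg s x j with
        | none => []
        | some m => (chainIdx s m).map (fun t => (t, clen s t)) := by
  intro j
  induction hfu : s.length - j using Nat.strong_induction_on generalizing j with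
  | _ f ih =>
    intro hj x
    by_cases hx : x < s.getD j 0
    · have hfg : fg s x j = some j := by rw [fg, dif_pos hj, if_pos hx]
      rw [hfg]
      cases hng : ng s j with
      | none =>
        rw [chainIdx_none s j hng]
        simp only [List.map_cons, List.map_nil, try2PopW]
        rw [if_neg (not_le.mpr hx)]
        simp [chainIdx_none s j hng]
      | some m =>
        rw [chainIdx_some s j m hng]
        simp only [List.map_cons, try2PopW]
        rw [if_neg (not_le.mpr hx)]
        simp [chainIdx_some s j m hng]
    · have hle : s.getD j 0 ≤ x := not_lt.mp hx
      have hfg : fg s x j = fg s x (j + 1) := by rw [fg, dif_pos hj, if_neg hx]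
      rw [hfg]
      cases hng : ng s j with
      | none =>
        rw [chainIdx_none s j hng]
        have hstep : try2PopW s x [(j, clen s j)] = [] := by
          simp only [try2PopW]
          rw [if_pos hle]
        simp only [List.map_cons, List.map_nil]
        rw [hstep]
        have hall := (fg_none_iff s (s.getD j 0) (j + 1)).mp hng
        have hnone : fg s x (j + 1) = none :=
          (fg_none_iff s x (j + 1)).mpr (fun t ht1 ht2 => le_trans (hall t ht1 ht2) hle)
        rw [hnone]
      | some m =>
        obtain ⟨hjm, hmn, _, hfirst⟩ := fg_some s (s.getD j 0) (j + 1) m hng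
        rw [chainIdx_some s j m hng]
        simp only [List.map_cons]
        have hstep : try2PopW s x ((j, clen s j) :: (chainIdx s m).map (fun t => (t, clen s t))) =
            try2PopW s x ((chainIdx s m).map (fun t => (t, clen s t))) := by
          simp only [try2PopW]
          rw [if_pos hle]
        rw [hstep]
        have hskip : fg s x (j + 1) = fg s x m :=
          fg_skip s x (j + 1) m hjm (fun t ht1 ht2 => le_trans (hfirst t ht1 ht2) hle)
        rw [hskip]
        exact ih (s.length - m) (by omega) m rfl (by omega) x

theorem popW_stState (s : List Int) (k : Nat) (hk : k < s.length) :
    try2PopW s (s.getD k 0) (stState s (k + 1)) =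
      match ng s k with
      | none => []
      | some m => (chainIdx s m).map (fun t => (t, clen s t)) := by
  by_cases h1 : k + 1 < s.length
  · unfold stState
    rw [if_pos h1]
    exact popW_chain s (k + 1) h1 (s.getD k 0)
  · have hng : ng s k = none := by
      unfold ng fg
      simp [h1]
    unfold stState
    rw [if_neg h1, hng]
    rfl

theorem pass_invariant (s : List Int) :
    ∀ k, k ≤ s.length →
      try2Pass s k (stState s k)
        ((List.range' k (s.length - k)).map (fun i => ng s i)) (bestSpec s k) =
      ((List.range s.length).map (fun i => ng s i), bestSpec s 0) := by
  intro k
  induction k with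
  | zero =>
    intro _
    rw [try2Pass, List.range_eq_range', Nat.sub_zero]
  | succ k ih =>
    intro hk
    have hkn : k < s.length := by omega
    have hbest : bestSpec s k =
        if (bestSpec s (k + 1)).2 ≤ clen s k then (k, clen s k) else bestSpec s (k + 1) := by
      rw [bestSpec, dif_pos hkn]
    have hnxt : (List.range' k (s.length - k)).map (fun i => ng s i) =
        ng s k :: (List.range' (k + 1) (s.length - (k + 1))).map (fun i => ng s i) := by
      have hsp : s.length - k = (s.length - (k + 1)) + 1 := by omega
      rw [hsp, List.range'_succ, List.map_cons]
    cases hng : ng s k with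
    | none =>
      have hpop : try2PopW s (s.getD k 0) (stState s (k + 1)) = [] := by
        rw [popW_stState s k hkn, hng]
      have hclen : clen s k = 1 := by rw [clen_eq, hng]
      have hst : stState s k = [(k, (1 : Nat))] := by
        unfold stState
        rw [if_pos hkn, chainIdx_none s k hng, List.map_cons, List.map_nil, hclen]
      have hbest1 : bestSpec s k =
          if (bestSpec s (k + 1)).2 ≤ 1 then (k, (1 : Nat)) else bestSpec s (k + 1) := by
        rw [hbest, hclen]
      rw [hng] at hnxt
      rw [try2Pass]
      try dsimp only
      rw [hpop]
      try dsimp only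
      rw [← hst, ← hbest1, ← hnxt]
      exact ih (by omega)
    | some m =>
      have hclen : clen s k = clen s m + 1 := by rw [clen_eq, hng]
      obtain ⟨tl, htl⟩ : ∃ tl, chainIdx s m = m :: tl := by
        cases h2 : ng s m with
        | none => exact ⟨[], chainIdx_none s m h2⟩
        | some m2 => exact ⟨chainIdx s m2, chainIdx_some s m m2 h2⟩
      have hpop : try2PopW s (s.getD k 0) (stState s (k + 1)) =
          (m, clen s m) :: tl.map (fun t => (t, clen s t)) := by
        rw [popW_stState s k hkn, hng]
        dsimp only
        rw [htl, List.map_cons]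
      have hst : stState s k =
          (k, clen s m + 1) :: (m, clen s m) :: tl.map (fun t => (t, clen s t)) := by
        unfold stState
        rw [if_pos hkn, chainIdx_some s k m hng, List.map_cons, htl, List.map_cons, hclen]
      have hbest2 : bestSpec s k =
          if (bestSpec s (k + 1)).2 ≤ clen s m + 1 then (k, clen s m + 1)
          else bestSpec s (k + 1) := by
        rw [hbest, hclen]
      rw [hng] at hnxt
      rw [try2Pass]
      try dsimp only
      rw [hpop]
      try dsimp only
      rw [← hst, ← hbest2, ← hnxt]
      exact ih (by omega)

theorem bestSpec_bounds (s : List Int) :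
    ∀ k, k < s.length → k ≤ (bestSpec s k).1 ∧ (bestSpec s k).1 < s.length ∧
      (bestSpec s k).2 = clen s (bestSpec s k).1 := by
  intro k
  induction hfu : s.length - k using Nat.strong_induction_on generalizing k with
  | _ f ih =>
    intro hk
    rw [bestSpec]
    rw [dif_pos hk]
    by_cases hk1 : k + 1 < s.length
    · obtain ⟨h1, h2, h3⟩ := ih (s.length - (k + 1)) (by omega) (k + 1) rfl hk1
      by_cases hc : (bestSpec s (k + 1)).2 ≤ clen s k
      · rw [if_pos hc]
        exact ⟨le_refl _, hk, rfl⟩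
      · rw [if_neg hc]
        exact ⟨by omega, h2, h3⟩
    · have hz : bestSpec s (k + 1) = (0, 0) := by rw [bestSpec, dif_neg hk1]
      rw [hz]
      rw [if_pos (Nat.zero_le _)]
      exact ⟨le_refl _, hk, rfl⟩

theorem max?_range'_eq_bestSpec (s : List Int) :
    ∀ k, k < s.length →
      PySem.List.max? (List.range' k (s.length - k)) (fun i => ((chain s i).length : Int)) =
        some (bestSpec s k).1 := by
  intro k
  induction hfu : s.length - k using Nat.strong_induction_on generalizing k with
  | _ f ih =>
    intro hk
    rw [← hfu]
    have hsplit : s.length - k = (s.length - (k + 1)) + 1 := by omega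
    rw [hsplit, List.range'_succ, max?_cons]
    by_cases hk1 : k + 1 < s.length
    · rw [ih (s.length - (k + 1)) (by omega) (k + 1) rfl hk1]
      obtain ⟨hb1, hb2, hb3⟩ := bestSpec_bounds s (k + 1) hk1
      conv_rhs => rw [bestSpec]
      rw [dif_pos hk]
      dsimp only
      by_cases hc : (bestSpec s (k + 1)).2 ≤ clen s k
      · rw [if_pos hc]
        have hcc : clen s (bestSpec s (k + 1)).1 ≤ clen s k := hb3 ▸ hc
        have hni : ¬ (((chain s k).length : Int) <
            ((chain s (bestSpec s (k + 1)).1).length : Int)) :=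
          not_lt.mpr (by exact_mod_cast hcc)
        rw [if_neg hni]
      · rw [if_neg hc]
        have hlt : (((chain s k).length : Int) <
            ((chain s (bestSpec s (k + 1)).1).length : Int)) := by
          have hn2 : clen s k < clen s (bestSpec s (k + 1)).1 := by omega
          exact_mod_cast hn2
        rw [if_pos hlt]
    · have h0 : s.length - (k + 1) = 0 := by omega
      rw [h0, List.range'_zero]
      have hz : bestSpec s (k + 1) = (0, 0) := by rw [bestSpec, dif_neg hk1]
      conv_rhs => rw [bestSpec]
      rw [dif_pos hk]
      dsimp only
      rw [hz, if_pos (Nat.zero_le _)]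
      rfl

theorem walk_eq_chain (s : List Int) :
    ∀ fuel i acc, i < s.length → s.length - i ≤ fuel →
      try2Walk s ((List.range s.length).map (fun t => ng s t)) fuel (some i) acc =
        acc ++ chain s i := by
  intro fuel
  induction fuel with
  | zero => intro i acc hi hf; omega
  | succ f ih =>
    intro i acc hi hf
    have hget : ((List.range s.length).map (fun t => ng s t)).getD i none = ng s i := by
      rw [List.getD_eq_getElem?_getD]
      simp [List.getElem?_range, hi]
    rw [try2Walk, hget]
    cases hng : ng s i with
    | none =>
      rw [chain_none s i hng]
      cases f <;> rfl
    | some m =>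
      obtain ⟨him, hm⟩ := ng_gt s i m hng
      rw [ih m (acc ++ [s.getD i 0]) hm (by omega), chain_some s i m hng]
      simp

-- ===== VERDICT (by name: the statement is the Claim_ definition above) =====
theorem try2_spec : Claim_equal_try2 := by
  intro s _hd
  unfold Spec_try2
  rw [try2_eq_max?, max?_map]
  by_cases hn : s.length = 0
  · unfold try2_alt
    rw [if_pos hn, hn]
    rfl
  · unfold try2_alt
    rw [if_neg hn]
    dsimp only
    have hpass := pass_invariant s s.length (le_refl _)
    have h1 : stState s s.length = [] := by unfold stState; simp
    have h2 : (List.range' s.length (s.length - s.length)).map (fun i => ng s i) = [] := by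
      simp
    have h3 : bestSpec s s.length = (0, 0) := by rw [bestSpec]; simp
    rw [h1, h2, h3] at hpass
    rw [hpass]
    dsimp only
    have hn' : 0 < s.length := Nat.pos_of_ne_zero hn
    obtain ⟨_, hb1, _⟩ := bestSpec_bounds s 0 hn'
    rw [walk_eq_chain s s.length (bestSpec s 0).1 [] hb1 (by omega)]
    have hmax := max?_range'_eq_bestSpec s 0 hn'
    rw [Nat.sub_zero] at hmax
    rw [List.range_eq_range', hmax]
    simp
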